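-- pv_equiv track=rewrite | github.com/hannahspiegel/VGL_SRA_XML | XML_autofill.py | verify_paired_layout
-- ===== SOURCE A (Python) =====
-- def verify_paired_layout(paths):
--     pe = False
--     for current, next_path in zip(paths, paths[1:]):
--         if current[-1] == "1" and next_path[-1] == "2":
--             if pe:
--                 return False
--             pe = True
--         elif current[-1] == next_path[-1]:
--             continue
--         else:
--             return False
--     return pe
-- ===== SOURCE B (Python) =====
-- def verify_paired_layout(paths):
--     lasts = [p[-1] for p in paths]
--     try:
--         i = lasts.index("2")
--     except ValueError:
--         return False
--     return i > 0 and all(c == "1" for c in lasts[:i]) and all(c == "2" for c in lasts[i:])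
-- ===== Notes on version B (the rewrite author's own statement) =====
-- stated objective: simpler
-- what changed: B replaces A's adjacent-pair scan with a stateful pe flag by a pivot computation: take the last characters, locate the first '2', and check the prefix is all '1' and the suffix all '2'.
-- outside the precondition, e.g. on verify_paired_layout(['3', '4', '']): A returns False, B raises IndexError
import Mathlib
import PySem

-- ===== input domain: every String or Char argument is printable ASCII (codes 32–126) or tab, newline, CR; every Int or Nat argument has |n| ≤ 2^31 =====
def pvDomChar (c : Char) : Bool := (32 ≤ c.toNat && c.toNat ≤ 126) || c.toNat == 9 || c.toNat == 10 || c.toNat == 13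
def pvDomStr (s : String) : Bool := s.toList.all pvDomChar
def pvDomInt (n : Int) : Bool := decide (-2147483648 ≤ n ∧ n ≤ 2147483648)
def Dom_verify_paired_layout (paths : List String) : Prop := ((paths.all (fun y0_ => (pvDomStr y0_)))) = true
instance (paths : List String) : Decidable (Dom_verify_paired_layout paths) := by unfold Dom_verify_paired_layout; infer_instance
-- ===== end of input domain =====

-- B replaces A's adjacent-pair scan with a pe flag by a pivot computation (first '2' in the
-- last characters, then two homogeneous-segment checks); objective: simpler.

-- ===== PORT A =====
-- s[-1]; exact on nonempty s (Pre_ excludes the empty string, where Python raises IndexError)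
def pvLast (s : String) : Char := (PySem.Str.pyGet? s (-1)).getD ' '

-- the 'for current, next_path in zip(paths, paths[1:])' loop with its pe accumulator
def pvGoA (pe : Bool) : List (String × String) → Bool
  | [] => pe
  | (c, n) :: rest =>
    if pvLast c == '1' && pvLast n == '2' then
      if pe then false else pvGoA true rest
    else if pvLast c == pvLast n then pvGoA pe rest
    else false

def verify_paired_layout (paths : List String) : Bool :=
  pvGoA false (paths.zip (PySem.List.slice paths (some 1) none))

-- ===== PORT B =====
def verify_paired_layout_alt (paths : List String) : Bool :=
  let lasts := paths.map pvLast
  match PySem.List.index? lasts '2' with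
  | none => false
  | some i =>
    decide (0 < i) && (PySem.List.slice lasts none (some (i : Int))).all (· == '1')
      && (PySem.List.slice lasts (some (i : Int)) none).all (· == '2')

-- ===== PRECONDITION & SPEC =====
-- Pre_ excludes lists containing an empty string: there Python's s[-1] raises IndexError
-- (A raises on most such inputs; on the rest it returns only because an earlier mismatch
-- exits first, while B, which reads every last character eagerly, raises on all of them).
def Pre_verify_paired_layout (paths : List String) : Prop := ∀ s ∈ paths, s.toList ≠ []
instance (paths : List String) : Decidable (Pre_verify_paired_layout paths) := by
  unfold Pre_verify_paired_layout; infer_instance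

def pvWitness_verify_paired_layout : List String := ["a_1", "b_2"]

def Spec_verify_paired_layout (paths : List String) (out : Bool) : Prop := out = verify_paired_layout_alt paths
instance (paths : List String) (out : Bool) : Decidable (Spec_verify_paired_layout paths out) := by unfold Spec_verify_paired_layout; infer_instance

-- ===== CLAIM (what is proved, stated in full; the proofs are below) =====
def Claim_equal_verify_paired_layout : Prop := ∀ (paths : List String), Dom_verify_paired_layout paths → Pre_verify_paired_layout paths → Spec_verify_paired_layout paths (verify_paired_layout paths)

-- ===== LEMMAS AND PROOFS =====

-- A's loop over the last characters only
def goC (pe : Bool) : List Char → Bool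
  | [] => pe
  | [_] => pe
  | x :: y :: r =>
    if x == '1' && y == '2' then (if pe then false else goC true (y :: r))
    else if x == y then goC pe (y :: r) else false

-- B's computation over the last characters only
def bC (ls : List Char) : Bool :=
  match PySem.List.index? ls '2' with
  | none => false
  | some i => decide (0 < i) && (ls.take i).all (· == '1') && (ls.drop i).all (· == '2')

lemma goA_eq_goC : ∀ (paths : List String) (pe : Bool),
    pvGoA pe (paths.zip paths.tail) = goC pe (paths.map pvLast) := by
  intro paths
  induction paths with
  | nil => intro pe; rfl
  | cons s t ih =>
    intro pe
    cases t with
    | nil => rfl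
    | cons u r =>
      have h1 := ih true
      have h2 := ih pe
      simp only [List.tail_cons] at h1 h2
      simp only [List.tail_cons, List.zip_cons_cons, List.map_cons, pvGoA, goC, h1, h2]

lemma bC_cons_ne {x : Char} (ls : List Char) (hx : x ≠ '2') :
    bC (x :: ls) = match PySem.List.index? ls '2' with
      | none => false
      | some j => (x == '1') && (ls.take j).all (· == '1') && (ls.drop j).all (· == '2') := by
  unfold bC
  rw [PySem.List.index?_cons_of_ne ls hx]
  cases h : PySem.List.index? ls '2' with
  | none => simp
  | some j =>
    simp [List.take_succ_cons, List.drop_succ_cons, Bool.and_assoc]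

lemma goC_true_two : ∀ r : List Char, goC true ('2' :: r) = r.all (· == '2') := by
  intro r
  induction r with
  | nil => rfl
  | cons z r' ih =>
    by_cases hz : z = '2'
    · subst hz; simpa [goC] using ih
    · simp [goC, hz, List.all_cons, Ne.symm hz]

lemma goC_eq_bC : ∀ ls : List Char, goC false ls = bC ls := by
  intro ls
  induction ls with
  | nil => decide
  | cons x tl ih =>
    cases tl with
    | nil =>
      by_cases hx : x = '2'
      · subst hx; decide
      · rw [show goC false [x] = false from rfl, bC_cons_ne [] hx]; rfl
    | cons y r =>
      by_cases h12 : x = '1' ∧ y = '2'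
      · obtain ⟨hx, hy⟩ := h12; subst hx; subst hy
        rw [show goC false ('1' :: '2' :: r) = goC true ('2' :: r) by simp [goC]]
        rw [goC_true_two, bC_cons_ne ('2' :: r) (by decide),
            PySem.List.index?_cons_self]
        simp
      · by_cases hxy : x = y
        · subst hxy
          rw [show goC false (x :: x :: r) = goC false (x :: r) by
                simp [goC]; intro h1 h2; exact absurd ⟨h1, h2⟩ h12]
          rw [ih]
          by_cases hx2 : x = '2'
          · subst hx2
            unfold bC
            rw [PySem.List.index?_cons_self, PySem.List.index?_cons_self]
            simp
          · rw [bC_cons_ne (x :: r) hx2, bC_cons_ne r hx2,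
                PySem.List.index?_cons_of_ne r hx2]
            cases h : PySem.List.index? r '2' with
            | none => simp
            | some j =>
              simp only [Option.map_some]
              cases hb : (x == '1') <;>
                simp [List.take_succ_cons, List.drop_succ_cons, hb]
        · -- mismatch: A returns False; show B does too
          rw [show goC false (x :: y :: r) = false by
                simp [goC, hxy]; intro h1 h2; exact absurd ⟨h1, h2⟩ h12]
          by_cases hx2 : x = '2'
          · subst hx2
            unfold bC
            rw [PySem.List.index?_cons_self]
            simp
          · rw [bC_cons_ne (y :: r) hx2]
            by_cases hx1 : x = '1'
            · subst hx1
              have hy2 : y ≠ '2' := fun hy => h12 ⟨rfl, hy⟩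
              have hy1 : y ≠ '1' := fun hy => hxy hy.symm
              rw [PySem.List.index?_cons_of_ne r hy2]
              cases h : PySem.List.index? r '2' with
              | none => simp
              | some j =>
                simp only [Option.map_some]
                simp [List.take_succ_cons, List.all_cons, hy1]
            · cases h : PySem.List.index? (y :: r) '2' with
              | none => simp
              | some j => simp [hx1]

lemma alt_eq_bC (paths : List String) : verify_paired_layout_alt paths = bC (paths.map pvLast) := by
  unfold verify_paired_layout_alt bC
  dsimp only
  cases PySem.List.index? (paths.map pvLast) '2' with
  | none => rfl
  | some i => simp [PySem.List.slice_to_natCast, PySem.List.slice_from_natCast]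

-- ===== VERDICT (by name: the statement is the Claim_ definition above) =====
theorem verify_paired_layout_spec : Claim_equal_verify_paired_layout := by
  intro paths _ _
  unfold Spec_verify_paired_layout verify_paired_layout
  rw [PySem.List.slice_from_one, goA_eq_goC, goC_eq_bC, alt_eq_bC]
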